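-- pv_equiv track=rewrite | github.com/S-Christensen/cartographersStudy | spring/midgameEvaluation.py | greenbough_progress
-- ===== SOURCE A (Python) =====
-- def greenbough_progress(grid):
--     rows, cols = len(grid), len(grid[0])
--     row_count = 0
--     col_set = set()
--
--     for r in range(rows):
--         row_has_forest = False
--         for c in range(cols):
--             if grid[r][c] == "Forest":
--                 row_has_forest = True
--                 col_set.add(c)
--         if row_has_forest:
--             row_count += 1
--
--     return row_count + len(col_set)
-- ===== SOURCE B (Python) =====
-- def greenbough_progress(grid):
--     rows, cols = len(grid), len(grid[0])
--     row_count = sum(1 for r in range(rows)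
--                     if any(grid[r][c] == "Forest" for c in range(cols)))
--     col_count = sum(1 for c in range(cols)
--                     if any(grid[r][c] == "Forest" for r in range(rows)))
--     return row_count + col_count
-- ===== Notes on version B (the rewrite author's own statement) =====
-- stated objective: simpler
-- what changed: Drops the mutable col_set and the row flag entirely: the answer is computed as two independent counts, a row-major count of forest-containing rows plus a transposed column-major count of forest-containing columns.
import Mathlib
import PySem

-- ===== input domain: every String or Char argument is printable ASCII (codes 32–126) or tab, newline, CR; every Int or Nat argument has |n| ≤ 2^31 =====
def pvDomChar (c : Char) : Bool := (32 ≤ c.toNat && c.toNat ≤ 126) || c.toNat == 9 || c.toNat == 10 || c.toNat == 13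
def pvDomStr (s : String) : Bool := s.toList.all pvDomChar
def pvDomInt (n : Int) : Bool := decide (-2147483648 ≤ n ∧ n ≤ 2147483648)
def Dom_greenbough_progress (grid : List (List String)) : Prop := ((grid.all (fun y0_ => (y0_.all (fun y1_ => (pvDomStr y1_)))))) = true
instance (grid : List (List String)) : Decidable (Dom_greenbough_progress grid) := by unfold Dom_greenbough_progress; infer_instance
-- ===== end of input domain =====

-- B replaces A's mutable col_set and row flag with two independent counts (row-major rows, transposed column-major columns): simpler decomposition, same cost.

-- shared cell access grid[r][c]; exact under Pre_ (both indices in range there)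
def pvCell (grid : List (List String)) (r c : Int) : String :=
  PySem.List.pyGetD (PySem.List.pyGetD grid r []) c ""

-- ===== PORT A =====
def greenbough_progress (grid : List (List String)) : Int :=
  let rows : Int := grid.length
  let cols : Int := (PySem.List.pyGetD grid 0 []).length
  let res :=
    (PySem.List.pyRange 0 rows 1).foldl
      (fun (st : Int × PySem.Set Int) r =>
        let inner :=
          (PySem.List.pyRange 0 cols 1).foldl
            (fun (st2 : Bool × PySem.Set Int) c =>
              if pvCell grid r c == "Forest" then (true, PySem.Set.add st2.2 c) else st2)
            (false, st.2)
        (if inner.1 then st.1 + 1 else st.1, inner.2))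
      (0, PySem.Set.empty)
  res.1 + (PySem.Set.len res.2 : Int)

-- ===== PORT B =====
def greenbough_progress_alt (grid : List (List String)) : Int :=
  let rows : Int := grid.length
  let cols : Int := (PySem.List.pyGetD grid 0 []).length
  let rowCount : Int :=
    ((PySem.List.pyRange 0 rows 1).map
      (fun r => if (PySem.List.pyRange 0 cols 1).any (fun c => pvCell grid r c == "Forest") then (1 : Int) else 0)).sum
  let colCount : Int :=
    ((PySem.List.pyRange 0 cols 1).map
      (fun c => if (PySem.List.pyRange 0 rows 1).any (fun r => pvCell grid r c == "Forest") then (1 : Int) else 0)).sum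
  rowCount + colCount

-- ===== PRECONDITION & SPEC =====
-- Pre_ excludes exactly the inputs where A raises IndexError: the empty grid (len(grid[0]))
-- and ragged grids having a row shorter than the first row.
def Pre_greenbough_progress (grid : List (List String)) : Prop :=
  grid ≠ [] ∧ ∀ row ∈ grid, (PySem.List.pyGetD grid 0 []).length ≤ row.length
instance (grid : List (List String)) : Decidable (Pre_greenbough_progress grid) := by
  unfold Pre_greenbough_progress; infer_instance

def pvWitness_greenbough_progress : List (List String) :=
  [["Forest", "x"], ["y", "z"]]

def Spec_greenbough_progress (grid : List (List String)) (out : Int) : Prop := out = greenbough_progress_alt grid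
instance (grid : List (List String)) (out : Int) : Decidable (Spec_greenbough_progress grid out) := by unfold Spec_greenbough_progress; infer_instance

-- ===== CLAIM (what is proved, stated in full; the proofs are below) =====
def Claim_equal_greenbough_progress : Prop := ∀ (grid : List (List String)), Dom_greenbough_progress grid → Pre_greenbough_progress grid → Spec_greenbough_progress grid (greenbough_progress grid)

-- ===== LEMMAS AND PROOFS =====

-- the inner for-c loop: flag = any forest in the row; set = conditional adds = adds over the filtered list
theorem pv_inner_eq (q : Int → Bool) :
    ∀ (C : List Int) (b : Bool) (s : PySem.Set Int),
      C.foldl (fun (st2 : Bool × PySem.Set Int) c =>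
          if q c then (true, PySem.Set.add st2.2 c) else st2) (b, s)
        = (b || C.any q, (C.filter q).foldl (fun s c => PySem.Set.add s c) s) := by
  intro C
  induction C with
  | nil => simp
  | cons c C ih =>
    intro b s
    by_cases h : q c <;> simp [h, ih]

theorem pv_mem_foldl_add :
    ∀ (l : List Int) (s : PySem.Set Int) (y : Int),
      y ∈ l.foldl (fun s c => PySem.Set.add s c) s ↔ y ∈ s ∨ y ∈ l := by
  intro l
  induction l with
  | nil => simp
  | cons c l ih =>
    intro s y
    simp [ih, PySem.Set.mem_add]
    tauto

theorem pv_nodup_foldl_add :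
    ∀ (l : List Int) (s : PySem.Set Int), s.Nodup →
      (l.foldl (fun s c => PySem.Set.add s c) s).Nodup := by
  intro l
  induction l with
  | nil => intro s h; exact h
  | cons c l ih =>
    intro s h
    exact ih _ (PySem.Set.nodup_add _ _ h)

-- the outer for-r loop: count = number of forest rows; set = nested adds
theorem pv_outer_eq (q : Int → Int → Bool) (C : List Int) :
    ∀ (R : List Int) (cnt : Int) (s : PySem.Set Int),
      R.foldl (fun (st : Int × PySem.Set Int) r =>
          let inner := C.foldl (fun (st2 : Bool × PySem.Set Int) c =>
              if q r c then (true, PySem.Set.add st2.2 c) else st2) (false, st.2)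
          (if inner.1 then st.1 + 1 else st.1, inner.2)) (cnt, s)
        = (cnt + (R.countP (fun r => C.any (q r)) : Int),
           R.foldl (fun s r => (C.filter (q r)).foldl (fun s c => PySem.Set.add s c) s) s) := by
  intro R
  induction R with
  | nil => simp
  | cons r R ih =>
    intro cnt s
    simp only [List.foldl_cons, pv_inner_eq, Bool.false_or] at ih ⊢
    rw [ih]
    by_cases h : C.any (q r) <;> simp [h] <;> omega

theorem pv_mem_nested (q : Int → Int → Bool) (C : List Int) :
    ∀ (R : List Int) (s : PySem.Set Int) (y : Int),
      y ∈ R.foldl (fun s r => (C.filter (q r)).foldl (fun s c => PySem.Set.add s c) s) s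
        ↔ y ∈ s ∨ ∃ r ∈ R, q r y ∧ y ∈ C := by
  intro R
  induction R with
  | nil => simp
  | cons r R ih =>
    intro s y
    simp [ih, pv_mem_foldl_add, List.mem_filter]
    tauto

theorem pv_nodup_nested (q : Int → Int → Bool) (C : List Int) :
    ∀ (R : List Int) (s : PySem.Set Int), s.Nodup →
      (R.foldl (fun s r => (C.filter (q r)).foldl (fun s c => PySem.Set.add s c) s) s).Nodup := by
  intro R
  induction R with
  | nil => intro s h; exact h
  | cons r R ih =>
    intro s h
    exact ih _ (pv_nodup_foldl_add _ _ h)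

-- a 0/1-sum over a list is its countP, as an Int
theorem pv_sum_ite (l : List Int) (q : Int → Bool) :
    (l.map (fun x => if q x then (1 : Int) else 0)).sum = (l.countP q : Int) := by
  induction l with
  | nil => simp
  | cons x l ih =>
    by_cases h : q x <;> simp [h, ih] <;> omega

-- ===== VERDICT (by name: the statement is the Claim_ definition above) =====
theorem greenbough_progress_spec : Claim_equal_greenbough_progress := by
  intro grid _dom _pre
  show greenbough_progress grid = greenbough_progress_alt grid
  unfold greenbough_progress greenbough_progress_alt
  simp only [pv_outer_eq (fun r c => pvCell grid r c == "Forest"), pv_sum_ite]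
  set R := PySem.List.pyRange 0 (grid.length : Int) 1 with hR
  set C := PySem.List.pyRange 0 ((PySem.List.pyGetD grid 0 []).length : Int) 1 with hC
  have hset :
      (R.foldl (fun s r => (C.filter (fun c => pvCell grid r c == "Forest")).foldl
          (fun s c => PySem.Set.add s c) s) PySem.Set.empty).length
        = C.countP (fun c => R.any (fun r => pvCell grid r c == "Forest")) := by
    rw [List.countP_eq_length_filter]
    apply List.Perm.length_eq
    apply (List.perm_ext_iff_of_nodup _ _).2
    · intro y
      rw [pv_mem_nested, List.mem_filter, List.any_eq_true]
      constructor
      · rintro (h | ⟨r, hr, hq, hyC⟩)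
        · exact absurd h (by simp [PySem.Set.empty])
        · exact ⟨hyC, r, hr, hq⟩
      · rintro ⟨hyC, r, hr, hq⟩
        exact Or.inr ⟨r, hr, hq, hyC⟩
    · exact pv_nodup_nested _ _ _ _ List.nodup_nil
    · exact (PySem.List.nodup_pyRange_one 0 _).filter _
  simp only [PySem.Set.len]
  rw [hset]
  ring
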